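-- pv_equiv track=rewrite | github.com/ksato007/bedrock-code-gen | code_gen/graph_state.py | keep_last
-- ===== SOURCE A (Python) =====
-- def keep_last(managed_messages):
--     seen = set()
--     result = []
--     last_role = None
--     for role, message in reversed(managed_messages):
--         if message not in seen:
--             seen.add(message)
--             if last_role is None or role != last_role:
--                 result.append((role, message))
--                 last_role = role
--     return list(reversed(result))
-- ===== SOURCE B (Python) =====
-- def keep_last(managed_messages):
--     # last index of each message in one forward pass
--     last = {}
--     for i, (_, m) in enumerate(managed_messages):
--         last[m] = i
--     # forward pass: keep entries at their message's last index, collapsing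
--     # consecutive same-role runs by replacing the previous entry (keep last of run)
--     out = []
--     for i, (r, m) in enumerate(managed_messages):
--         if last.get(m) == i:
--             if out and out[-1][0] == r:
--                 out[-1] = (r, m)
--             else:
--                 out.append((r, m))
--     return out
-- ===== Notes on version B (the rewrite author's own statement) =====
-- stated objective: alternative
-- what changed: A's single backward pass over reversed(messages) with a seen-set and a final reverse is replaced by two forward passes: a dict of each message's last index selects the kept entries, and a replace-last fold collapses consecutive same-role runs, building the result directly in forward order.
import Mathlib
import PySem

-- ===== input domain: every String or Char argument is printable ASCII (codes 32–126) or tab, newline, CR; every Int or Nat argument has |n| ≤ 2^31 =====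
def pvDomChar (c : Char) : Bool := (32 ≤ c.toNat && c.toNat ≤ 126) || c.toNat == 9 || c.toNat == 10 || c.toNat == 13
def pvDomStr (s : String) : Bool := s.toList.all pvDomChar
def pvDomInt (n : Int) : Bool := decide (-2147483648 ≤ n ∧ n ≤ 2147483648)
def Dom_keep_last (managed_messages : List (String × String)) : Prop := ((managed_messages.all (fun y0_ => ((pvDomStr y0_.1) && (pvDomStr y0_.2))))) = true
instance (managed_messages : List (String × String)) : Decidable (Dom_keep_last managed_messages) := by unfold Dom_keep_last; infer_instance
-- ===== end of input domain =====

-- B replaces A's backward seen-set pass + final reverse by two forward passes: a dict of each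
-- message's last index selects the kept entries, and a replace-last fold collapses same-role runs
-- (objective: alternative decomposition, same cost).

-- ===== PORT A =====
-- loop body of A's single backward pass, state = (seen, result, last_role)
def klStepA (st : PySem.Set String × List (String × String) × Option String)
    (rm : String × String) : PySem.Set String × List (String × String) × Option String :=
  if !(PySem.Set.contains st.1 rm.2) then
    let seen := PySem.Set.add st.1 rm.2
    if st.2.2.isNone || !(st.2.2 == some rm.1) then (seen, st.2.1 ++ [rm], some rm.1)
    else (seen, st.2.1, st.2.2)
  else st

def keep_last (managed_messages : List (String × String)) : List (String × String) :=
  ((managed_messages.reverse.foldl klStepA (PySem.Set.empty, [], none)).2.1).reverse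

-- ===== PORT B =====
-- B's run-collapsing step: 'if out and out[-1][0] == r: out[-1] = (r, m) else: out.append((r, m))'
def klStepB (out : List (String × String)) (p : String × String) : List (String × String) :=
  match out.getLast? with
  | some q => if q.1 == p.1 then out.dropLast ++ [p] else out ++ [p]
  | none => out ++ [p]

def keep_last_alt (managed_messages : List (String × String)) : List (String × String) :=
  let last : PySem.Dict String Int :=
    (PySem.List.enumerate managed_messages 0).foldl (fun d p => d.insert p.2.2 p.1) PySem.Dict.empty
  (PySem.List.enumerate managed_messages 0).foldl
    (fun out p => if PySem.Dict.get? last p.2.2 == some p.1 then klStepB out p.2 else out) []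

-- ===== PRECONDITION & SPEC =====
def Spec_keep_last (managed_messages : List (String × String)) (out : List (String × String)) : Prop := out = keep_last_alt managed_messages
instance (managed_messages : List (String × String)) (out : List (String × String)) : Decidable (Spec_keep_last managed_messages out) := by unfold Spec_keep_last; infer_instance

-- ===== CLAIM (what is proved, stated in full; the proofs are below) =====
def Claim_equal_keep_last : Prop := ∀ (managed_messages : List (String × String)), Dom_keep_last managed_messages → Spec_keep_last managed_messages (keep_last managed_messages)

-- ===== LEMMAS AND PROOFS =====

-- the messages of a list of (role, message) pairs
def klMsgs (xs : List (String × String)) : List String := xs.map Prod.snd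

-- dedup keeping the last occurrence of each message, forward order
def klDedupLast : List (String × String) → List (String × String)
  | [] => []
  | x :: t => if x.2 ∈ klMsgs t then klDedupLast t else x :: klDedupLast t

-- collapse consecutive same-role runs keeping the last entry of each run
def klCl : List (String × String) → List (String × String)
  | [] => []
  | [x] => [x]
  | x :: y :: t => if x.1 = y.1 then klCl (y :: t) else x :: klCl (y :: t)

-- index of the last occurrence of m (meaningful when m ∈ klMsgs xs)
def klLastIdx : List (String × String) → String → Nat
  | [], _ => 0
  | _ :: t, m => if m ∈ klMsgs t then klLastIdx t m + 1 else 0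

-- A's dedup-by-seen pass, kept entries only
def klDdf : PySem.Set String → List (String × String) → List (String × String)
  | _, [] => []
  | seen, x :: t =>
    if PySem.Set.contains seen x.2 then klDdf seen t
    else x :: klDdf (PySem.Set.add seen x.2) t

-- A's seen set after the pass
def klSA : PySem.Set String → List (String × String) → PySem.Set String
  | seen, [] => seen
  | seen, x :: t =>
    if PySem.Set.contains seen x.2 then klSA seen t
    else klSA (PySem.Set.add seen x.2) t

-- role of the last processed element (else the initial last_role)
def klLrD : Option String → List (String × String) → Option String
  | lr, [] => lr
  | _, x :: t => klLrD (some x.1) t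

-- A's role-collapse: keep first of each run
def klCf : Option String → List (String × String) → List (String × String)
  | _, [] => []
  | lr, x :: t => if lr == some x.1 then klCf lr t else x :: klCf (some x.1) t

-- dedup-last with an extra already-seen set
def klDlS : PySem.Set String → List (String × String) → List (String × String)
  | _, [] => []
  | seen, x :: t =>
    if x.2 ∈ seen ∨ x.2 ∈ klMsgs t then klDlS seen t else x :: klDlS seen t

theorem klFoldA (xs : List (String × String)) (seen : PySem.Set String)
    (res : List (String × String)) (lr : Option String) :
    xs.foldl klStepA (seen, res, lr)
      = (klSA seen xs, res ++ klCf lr (klDdf seen xs), klLrD lr (klDdf seen xs)) := by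
  induction xs generalizing seen res lr with
  | nil => simp [klSA, klDdf, klCf, klLrD]
  | cons x t ih =>
    by_cases hm : PySem.Set.contains seen x.2
    · have hx : x.2 ∈ seen := (PySem.Set.contains_iff _ _).1 hm
      simp [klStepA, hx, klDdf, klSA, ih]
    · have hx : ¬ x.2 ∈ seen := fun h => hm ((PySem.Set.contains_iff _ _).2 h)
      by_cases hl : lr == some x.1
      · have hlr : lr = some x.1 := by
          cases lr with
          | none => simp at hl
          | some a => simpa using hl
        subst hlr
        simp [klStepA, hx, klDdf, klSA, klCf, klLrD, ih]
      · have hcond : (lr.isNone || !(lr == some x.1)) = true := by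
          simp [hl]
        simp [klStepA, hx, hl, klDdf, klSA, klCf, klLrD, ih]

theorem klSA_mem (xs : List (String × String)) (seen : PySem.Set String) (m : String) :
    m ∈ klSA seen xs ↔ m ∈ seen ∨ m ∈ klMsgs xs := by
  induction xs generalizing seen with
  | nil => simp [klSA, klMsgs]
  | cons x t ih =>
    by_cases hm : PySem.Set.contains seen x.2
    · have hx : x.2 ∈ seen := (PySem.Set.contains_iff _ _).1 hm
      simp only [klSA, hm, if_pos, klMsgs, List.map_cons, List.mem_cons, ih]
      constructor
      · tauto
      · rintro (h | h | h) <;> first | tauto | (subst h; tauto)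
    · simp only [klSA, hm, if_neg, Bool.false_eq_true, not_false_iff, klMsgs,
        List.map_cons, List.mem_cons, ih, PySem.Set.mem_add]
      tauto

theorem klDdf_append (xs ys : List (String × String)) (seen : PySem.Set String) :
    klDdf seen (xs ++ ys) = klDdf seen xs ++ klDdf (klSA seen xs) ys := by
  induction xs generalizing seen with
  | nil => simp [klDdf, klSA]
  | cons x t ih =>
    by_cases hm : x.2 ∈ seen <;> simp [klDdf, klSA, hm, ih]

theorem klDdf_reverse (ms : List (String × String)) (seen : PySem.Set String) :
    klDdf seen ms.reverse = (klDlS seen ms).reverse := by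
  induction ms with
  | nil => simp [klDdf, klDlS]
  | cons x t ih =>
    have hiff : x.2 ∈ klSA seen t.reverse ↔ x.2 ∈ seen ∨ x.2 ∈ klMsgs t := by
      rw [klSA_mem]
      simp [klMsgs]
    rw [List.reverse_cons, klDdf_append, ih]
    by_cases h : x.2 ∈ seen ∨ x.2 ∈ klMsgs t
    · have hin : x.2 ∈ klSA seen t.reverse := hiff.2 h
      simp [klDdf, klDlS, hin, h]
    · have hout : x.2 ∉ klSA seen t.reverse := fun hh => h (hiff.1 hh)
      simp [klDdf, klDlS, hout, h]

theorem klDlS_empty (ms : List (String × String)) :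
    klDlS PySem.Set.empty ms = klDedupLast ms := by
  induction ms with
  | nil => rfl
  | cons x t ih =>
    have ih' : klDlS [] t = klDedupLast t := by simpa [PySem.Set.empty] using ih
    by_cases h : x.2 ∈ klMsgs t <;> simp [klDlS, klDedupLast, PySem.Set.empty, h, ih']

theorem klCf_append (xs ys : List (String × String)) (lr : Option String) :
    klCf lr (xs ++ ys) = klCf lr xs ++ klCf (klLrD lr xs) ys := by
  induction xs generalizing lr with
  | nil => simp [klCf, klLrD]
  | cons x t ih =>
    by_cases hl : lr == some x.1
    · have hlr : lr = some x.1 := by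
        cases lr with
        | none => simp at hl
        | some a => simpa using hl
      subst hlr
      simp [klCf, klLrD, ih]
    · simp [klCf, klLrD, hl, ih]

theorem klLrD_concat (xs : List (String × String)) (y : String × String) (lr : Option String) :
    klLrD lr (xs ++ [y]) = some y.1 := by
  induction xs generalizing lr with
  | nil => rfl
  | cons x t ih => simp [klLrD, ih]

theorem klCf_reverse (zs : List (String × String)) :
    (klCf none zs.reverse).reverse = klCl zs := by
  induction zs with
  | nil => rfl
  | cons x t ih =>
    cases t with
    | nil => simp [klCf, klCl]
    | cons y t' =>
      rw [List.reverse_cons, klCf_append, List.reverse_cons, klLrD_concat]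
      have ih' : (klCf none (t'.reverse ++ [y])).reverse = klCl (y :: t') := by
        rw [← List.reverse_cons]; exact ih
      by_cases hxy : x.1 = y.1
      · simp [klCf, klCl, hxy, ih']
      · have hyx : ¬ y.1 = x.1 := fun hh => hxy hh.symm
        simp [klCf, klCl, hxy, hyx, ih']

theorem keep_last_eq (ms : List (String × String)) :
    keep_last ms = klCl (klDedupLast ms) := by
  rw [keep_last, klFoldA]
  simp only []
  rw [klDdf_reverse, klDlS_empty]
  exact klCf_reverse (klDedupLast ms)

-- the dict pass: get? returns the last index of each present message
theorem klDict_get (ms : List (String × String)) (k : Int) (d : PySem.Dict String Int)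
    (m : String) :
    ((PySem.List.enumerate ms k).foldl (fun d p => d.insert p.2.2 p.1) d).get? m
      = if m ∈ klMsgs ms then some (k + (klLastIdx ms m : Int)) else d.get? m := by
  induction ms generalizing k d with
  | nil => simp [klMsgs]
  | cons x t ih =>
    rw [PySem.List.enumerate_cons, List.foldl_cons, ih]
    by_cases ht : m ∈ klMsgs t
    · have : m ∈ klMsgs (x :: t) := by simp [klMsgs] at ht ⊢; tauto
      simp only [ht, if_pos, this, klLastIdx]
      congr 1
      push_cast
      ring
    · rw [if_neg ht, PySem.Dict.get?_insert]
      by_cases hx : m = x.2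
      · have hmm : x.2 ∈ klMsgs (x :: t) := by simp [klMsgs]
        have ht' : x.2 ∉ klMsgs t := hx ▸ ht
        simp [hx, hmm, klLastIdx, ht']
      · have : ¬ m ∈ klMsgs (x :: t) := by simp [klMsgs] at ht ⊢; tauto
        simp [this, hx]

theorem klLastIdx_append (pre t : List (String × String)) (r m : String) :
    klLastIdx (pre ++ (r, m) :: t) m = pre.length ↔ m ∉ klMsgs t := by
  induction pre with
  | nil =>
    by_cases h : m ∈ klMsgs t <;> simp [klLastIdx, h]
  | cons p pre' ih =>
    have hmem : m ∈ klMsgs (pre' ++ (r, m) :: t) := by simp [klMsgs]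
    simp only [List.cons_append, klLastIdx, hmem, if_pos, List.length_cons,
      Nat.add_right_cancel_iff, ih]

theorem klFilter (ms : List (String × String)) :
    ∀ (suf pre : List (String × String)), ms = pre ++ suf →
    (((PySem.List.enumerate suf (pre.length : Int)).filter
        (fun p => ((PySem.List.enumerate ms 0).foldl
            (fun d p => d.insert p.2.2 p.1) PySem.Dict.empty).get? p.2.2 == some p.1)).map
        Prod.snd) = klDedupLast suf := by
  intro suf
  induction suf with
  | nil => intro pre h; simp [klDedupLast]
  | cons x t ih =>
    intro pre h
    have hc : (((PySem.List.enumerate ms 0).foldl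
          (fun d p => d.insert p.2.2 p.1) PySem.Dict.empty).get? x.2
            == some (pre.length : Int)) = decide (x.2 ∉ klMsgs t) := by
      have hmem : x.2 ∈ klMsgs ms := by simp [h, klMsgs]
      have hiff : klLastIdx ms x.2 = pre.length ↔ x.2 ∉ klMsgs t := by
        have hx : ms = pre ++ (x.1, x.2) :: t := by simpa using h
        rw [hx]
        exact klLastIdx_append pre t x.1 x.2
      rw [klDict_get, if_pos hmem]
      by_cases hmt : x.2 ∈ klMsgs t
      · have hne : klLastIdx ms x.2 ≠ pre.length := fun hh => (hiff.1 hh) hmt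
        have hne' : (klLastIdx ms x.2 : Int) ≠ (pre.length : Int) := by exact_mod_cast hne
        simp [hmt, hne']
      · have heq : klLastIdx ms x.2 = pre.length := hiff.2 hmt
        simp [hmt, heq]
    rw [PySem.List.enumerate_cons, List.filter_cons]
    have hnext : ms = (pre ++ [x]) ++ t := by simp [h]
    have hlen : ((pre.length : Int) + 1) = (((pre ++ [x]).length : Int)) := by
      simp
    by_cases hmt : x.2 ∈ klMsgs t
    · rw [hc]
      simp only [hmt, not_true_eq_false, decide_false, Bool.false_eq_true, if_neg,
        not_false_iff]
      rw [hlen, ih (pre ++ [x]) hnext]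
      simp [klDedupLast, hmt]
    · rw [hc]
      simp only [hmt, not_false_eq_true, decide_true, if_pos]
      rw [List.map_cons, hlen, ih (pre ++ [x]) hnext]
      simp [klDedupLast, hmt]

theorem klStepB_shift (zs : List (String × String)) (acc : List (String × String))
    (e : String × String) :
    zs.foldl klStepB (acc ++ [e]) = acc ++ zs.foldl klStepB [e] := by
  induction zs generalizing acc e with
  | nil => simp
  | cons z t ih =>
    by_cases hz : e.1 = z.1
    · have h1 : klStepB (acc ++ [e]) z = acc ++ [z] := by
        simp [klStepB, hz]
      have h2 : klStepB [e] z = [z] := by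
        simp [klStepB, hz]
      rw [List.foldl_cons, h1, List.foldl_cons, h2, ih]
    · have h1 : klStepB (acc ++ [e]) z = (acc ++ [e]) ++ [z] := by
        simp [klStepB, hz]
      have h2 : klStepB [e] z = [e] ++ [z] := by
        simp [klStepB, hz]
      rw [List.foldl_cons, h1, List.foldl_cons, h2, ih, ih [e] z]
      simp

theorem klFoldB_single (t : List (String × String)) (x : String × String) :
    t.foldl klStepB [x] = klCl (x :: t) := by
  induction t generalizing x with
  | nil => rfl
  | cons y t' ih =>
    by_cases hxy : x.1 = y.1
    · have h1 : klStepB [x] y = [y] := by simp [klStepB, hxy]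
      rw [List.foldl_cons, h1, ih, klCl, if_pos hxy]
    · have h1 : klStepB [x] y = [x] ++ [y] := by simp [klStepB, hxy]
      rw [List.foldl_cons, h1, klStepB_shift, ih, klCl, if_neg hxy]
      rfl

theorem klFoldB (zs : List (String × String)) :
    zs.foldl klStepB [] = klCl zs := by
  cases zs with
  | nil => rfl
  | cons x t =>
    have h1 : klStepB [] x = [x] := by simp [klStepB]
    rw [List.foldl_cons, h1, klFoldB_single]

theorem keep_last_alt_eq (ms : List (String × String)) :
    keep_last_alt ms = klCl (klDedupLast ms) := by
  rw [keep_last_alt]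
  simp only [PySem.List.foldl_if_eq_foldl_filter]
  rw [← List.foldl_map (f := Prod.snd) (g := klStepB)]
  have h2 := klFilter ms ms [] (by simp)
  simp only [List.length_nil, Nat.cast_zero] at h2
  rw [h2, klFoldB]

-- ===== VERDICT (by name: the statement is the Claim_ definition above) =====
theorem keep_last_spec : Claim_equal_keep_last := by
  intro ms _
  unfold Spec_keep_last
  rw [keep_last_eq, keep_last_alt_eq]
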